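-- pv_equiv track=rewrite | github.com/kostadis/CampaignGenerator | app.py | edge_color
-- ===== SOURCE A (Python) =====
-- EDGE_COLORS = {
--     "hostile":  "#ff4444",   # red    — enemy, hunts, opposes, attacks
--     "allied":   "#44ff88",   # green  — ally, allied with, supports, serves
--     "member":   "#ffaa44",   # orange — member of, belongs to, part of, controls
--     "located":  "#44aaff",   # blue   — located in, based in, found at, at
--     "triggers": "#ff44ff",   # pink   — triggers, activates, causes, linked to
--     "seeks":    "#ffff44",   # yellow — seeks, pursues, wants, searches for
--     "default":  "#cccccc",   # light grey
-- }
--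
-- def edge_color(label: str) -> str:
--     l = label.lower()
--     if any(w in l for w in ("enemy", "hostile", "hunts", "opposes", "against", "fights", "kills")):
--         return EDGE_COLORS["hostile"]
--     if any(w in l for w in ("ally", "allied", "support", "serves", "works for", "loyal", "friend")):
--         return EDGE_COLORS["allied"]
--     if any(w in l for w in ("member", "belongs", "part of", "controls", "leads", "commands", "runs")):
--         return EDGE_COLORS["member"]
--     if any(w in l for w in ("located", "based", "found at", " at ", "resides", "in ", "operates")):
--         return EDGE_COLORS["located"]
--     if any(w in l for w in ("trigger", "activates", "causes", "linked", "tied to", "scores")):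
--         return EDGE_COLORS["triggers"]
--     if any(w in l for w in ("seeks", "pursues", "wants", "searches", "hunts for", "after")):
--         return EDGE_COLORS["seeks"]
--     return EDGE_COLORS["default"]
-- ===== SOURCE B (Python) =====
-- EDGE_COLORS = {
--     "hostile":  "#ff4444",
--     "allied":   "#44ff88",
--     "member":   "#ffaa44",
--     "located":  "#44aaff",
--     "triggers": "#ff44ff",
--     "seeks":    "#ffff44",
--     "default":  "#cccccc",
-- }
--
-- # Flat keyword -> priority map (0 = highest priority group) and a palette indexed by priority.
-- _KEYWORD_PRIORITY = [
--     ("enemy", 0), ("hostile", 0), ("hunts", 0), ("opposes", 0), ("against", 0), ("fights", 0), ("kills", 0),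
--     ("ally", 1), ("allied", 1), ("support", 1), ("serves", 1), ("works for", 1), ("loyal", 1), ("friend", 1),
--     ("member", 2), ("belongs", 2), ("part of", 2), ("controls", 2), ("leads", 2), ("commands", 2), ("runs", 2),
--     ("located", 3), ("based", 3), ("found at", 3), (" at ", 3), ("resides", 3), ("in ", 3), ("operates", 3),
--     ("trigger", 4), ("activates", 4), ("causes", 4), ("linked", 4), ("tied to", 4), ("scores", 4),
--     ("seeks", 5), ("pursues", 5), ("wants", 5), ("searches", 5), ("hunts for", 5), ("after", 5),
-- ]
--
-- _PALETTE = [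
--     EDGE_COLORS["hostile"], EDGE_COLORS["allied"], EDGE_COLORS["member"],
--     EDGE_COLORS["located"], EDGE_COLORS["triggers"], EDGE_COLORS["seeks"],
--     EDGE_COLORS["default"],
-- ]
--
-- def edge_color(label: str) -> str:
--     l = label.lower()
--     best = min((p for w, p in _KEYWORD_PRIORITY if w in l), default=6)
--     return _PALETTE[best]
-- ===== Notes on version B (the rewrite author's own statement) =====
-- stated objective: alternative
-- what changed: Replaces the six short-circuiting if-statements over keyword groups with a single min-fold over a flat keyword-to-priority list: every matching keyword contributes its group priority, the minimum priority indexes a color palette (no early return, no grouped any()).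
import Mathlib
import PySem

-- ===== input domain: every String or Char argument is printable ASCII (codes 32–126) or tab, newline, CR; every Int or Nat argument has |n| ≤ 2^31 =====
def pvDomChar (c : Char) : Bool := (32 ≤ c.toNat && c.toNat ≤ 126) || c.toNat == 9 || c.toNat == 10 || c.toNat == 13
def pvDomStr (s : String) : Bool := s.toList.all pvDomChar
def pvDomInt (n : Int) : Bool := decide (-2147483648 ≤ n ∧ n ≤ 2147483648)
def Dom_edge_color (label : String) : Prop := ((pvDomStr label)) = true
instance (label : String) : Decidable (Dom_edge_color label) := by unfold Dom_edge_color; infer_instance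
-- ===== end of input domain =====

-- B replaces A's six short-circuiting if-statements with a single min-fold over a flat
-- keyword→priority list, then indexes a palette by the minimum matched priority (alternative decomposition).

-- ===== PORT A =====
def edge_color (label : String) : String :=
  let l := PySem.Str.lower label
  if [("enemy" : String), "hostile", "hunts", "opposes", "against", "fights", "kills"].any (fun w => PySem.Str.isIn w l) then "#ff4444"
  else if [("ally" : String), "allied", "support", "serves", "works for", "loyal", "friend"].any (fun w => PySem.Str.isIn w l) then "#44ff88"
  else if [("member" : String), "belongs", "part of", "controls", "leads", "commands", "runs"].any (fun w => PySem.Str.isIn w l) then "#ffaa44"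
  else if [("located" : String), "based", "found at", " at ", "resides", "in ", "operates"].any (fun w => PySem.Str.isIn w l) then "#44aaff"
  else if [("trigger" : String), "activates", "causes", "linked", "tied to", "scores"].any (fun w => PySem.Str.isIn w l) then "#ff44ff"
  else if [("seeks" : String), "pursues", "wants", "searches", "hunts for", "after"].any (fun w => PySem.Str.isIn w l) then "#ffff44"
  else "#cccccc"

-- ===== PORT B =====
def kwPriority : List (String × Nat) :=
  [ ("enemy", 0), ("hostile", 0), ("hunts", 0), ("opposes", 0), ("against", 0), ("fights", 0), ("kills", 0),
    ("ally", 1), ("allied", 1), ("support", 1), ("serves", 1), ("works for", 1), ("loyal", 1), ("friend", 1),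
    ("member", 2), ("belongs", 2), ("part of", 2), ("controls", 2), ("leads", 2), ("commands", 2), ("runs", 2),
    ("located", 3), ("based", 3), ("found at", 3), (" at ", 3), ("resides", 3), ("in ", 3), ("operates", 3),
    ("trigger", 4), ("activates", 4), ("causes", 4), ("linked", 4), ("tied to", 4), ("scores", 4),
    ("seeks", 5), ("pursues", 5), ("wants", 5), ("searches", 5), ("hunts for", 5), ("after", 5) ]

def palette : List String :=
  ["#ff4444", "#44ff88", "#ffaa44", "#44aaff", "#ff44ff", "#ffff44", "#cccccc"]

-- min(generator with default): fold that takes the min of the priorities of matching keywords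
def edge_color_alt (label : String) : String :=
  let l := PySem.Str.lower label
  let best := kwPriority.foldl (fun acc wp => if PySem.Str.isIn wp.1 l then min acc wp.2 else acc) 6
  palette.getD best "#cccccc"

-- ===== PRECONDITION & SPEC =====
def Spec_edge_color (label : String) (out : String) : Prop := out = edge_color_alt label
instance (label : String) (out : String) : Decidable (Spec_edge_color label out) := by unfold Spec_edge_color; infer_instance

-- ===== CLAIM (what is proved, stated in full; the proofs are below) =====
def Claim_equal_edge_color : Prop := ∀ (label : String), Dom_edge_color label → Spec_edge_color label (edge_color label)

-- ===== LEMMAS AND PROOFS =====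

-- the flat keyword list is the concatenation of the six groups, each at a constant priority
lemma kwPriority_eq :
    kwPriority =
      ([("enemy" : String), "hostile", "hunts", "opposes", "against", "fights", "kills"].map (fun w => (w, 0)))
      ++ ([("ally" : String), "allied", "support", "serves", "works for", "loyal", "friend"].map (fun w => (w, 1)))
      ++ ([("member" : String), "belongs", "part of", "controls", "leads", "commands", "runs"].map (fun w => (w, 2)))
      ++ ([("located" : String), "based", "found at", " at ", "resides", "in ", "operates"].map (fun w => (w, 3)))
      ++ ([("trigger" : String), "activates", "causes", "linked", "tied to", "scores"].map (fun w => (w, 4)))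
      ++ ([("seeks" : String), "pursues", "wants", "searches", "hunts for", "after"].map (fun w => (w, 5))) := rfl

-- folding the min-step over a constant-priority segment = min with that priority iff some keyword matches
lemma foldl_min_seg (l : String) (ws : List String) (p : Nat) (acc : Nat) :
    (ws.map (fun w => (w, p))).foldl (fun acc wp => if PySem.Str.isIn wp.1 l then min acc wp.2 else acc) acc
      = if ws.any (fun w => PySem.Str.isIn w l) then min acc p else acc := by
  induction ws generalizing acc with
  | nil => simp
  | cons w t ih =>
    simp only [List.map_cons, List.foldl_cons, List.any_cons, ih]
    by_cases h : PySem.Str.isIn w l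
    · simp only [h, if_true, Bool.true_or]
      by_cases h2 : t.any (fun w => PySem.Str.isIn w l)
      · simp only [h2, if_true, Nat.min_assoc, Nat.min_self]
      · simp only [h2, if_false, Bool.false_eq_true]
    · simp only [Bool.not_eq_true] at h
      simp only [h, Bool.false_or, Bool.false_eq_true, ite_false]

-- ===== VERDICT (by name: the statement is the Claim_ definition above) =====
set_option maxHeartbeats 1000000 in
theorem edge_color_spec : Claim_equal_edge_color := by
  intro label _
  unfold Spec_edge_color edge_color edge_color_alt
  rw [kwPriority_eq]
  simp only [List.foldl_append, foldl_min_seg]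
  generalize PySem.Str.lower label = l
  by_cases h1 : [("enemy" : String), "hostile", "hunts", "opposes", "against", "fights", "kills"].any (fun w => PySem.Str.isIn w l) <;>
  by_cases h2 : [("ally" : String), "allied", "support", "serves", "works for", "loyal", "friend"].any (fun w => PySem.Str.isIn w l) <;>
  by_cases h3 : [("member" : String), "belongs", "part of", "controls", "leads", "commands", "runs"].any (fun w => PySem.Str.isIn w l) <;>
  by_cases h4 : [("located" : String), "based", "found at", " at ", "resides", "in ", "operates"].any (fun w => PySem.Str.isIn w l) <;>
  by_cases h5 : [("trigger" : String), "activates", "causes", "linked", "tied to", "scores"].any (fun w => PySem.Str.isIn w l) <;>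
  by_cases h6 : [("seeks" : String), "pursues", "wants", "searches", "hunts for", "after"].any (fun w => PySem.Str.isIn w l) <;>
  simp only [h1, h2, h3, h4, h5, h6] <;> decide
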